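-- pv_equiv track=rewrite | github.com/Luftom/inssLLG | teste.py | formatar_texto
-- ===== SOURCE A (Python) =====
-- def formatar_texto(palavras):
--     #Ajusta pontuação, letra maiuscula após ponto e corta no último ponto final.
--     ultimo_ponto = None
--     for i in reversed(range(len(palavras))):
--         if palavras[i] == '.':
--             ultimo_ponto = i
--             break
--     if ultimo_ponto is not None:
--         palavras = palavras[:ultimo_ponto + 1]#se já tiver achado algum . ele para nesse ultimo . a frase
--
--     texto = ''
--     nova_frase = True
--
--     for palavra in palavras: #junta a pontuação a palavra e deixa maiuscula depois do ponto final
--         if palavra == '.':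
--             texto = texto.rstrip() + palavra #tira o espaço do lado direito da frase pra juntar a pontuação
--             nova_frase = True
--         elif palavra in ',!?;:':
--             texto = texto.rstrip() + palavra
--             nova_frase = False
--         else:
--             if nova_frase:
--                 palavra = palavra.capitalize() #deixa maiusculo a primeira letra
--                 nova_frase = False
--             texto += ' ' + palavra
--
--     return texto.strip()
-- ===== SOURCE B (Python) =====
-- PONTUACAO = ',!?;:'
--
-- def _eh_pontuacao(t):
--     return t == '.' or t in PONTUACAO
--
-- def formatar_texto(palavras):
--     # staged passes: cut at the last '.', capitalize by a local previous-token rule,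
--     # then render by runs (words joined with spaces, punctuation runs attached after one rstrip)
--     if '.' in palavras:
--         palavras = palavras[:len(palavras) - palavras[::-1].index('.')]
--     # start of text behaves exactly like "just after a period", hence the '.' sentinel
--     tokens = [w.capitalize() if prev == '.' and not _eh_pontuacao(w) else w
--               for prev, w in zip(['.'] + palavras, palavras)]
--     texto = ''
--     i = 0
--     n = len(tokens)
--     while i < n:
--         j = i
--         if _eh_pontuacao(tokens[i]):
--             while j < n and _eh_pontuacao(tokens[j]):
--                 j += 1
--             texto = texto.rstrip() + ''.join(tokens[i:j])
--         else:
--             while j < n and not _eh_pontuacao(tokens[j]):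
--                 j += 1
--             texto += ' ' + ' '.join(tokens[i:j])
--         i = j
--     return texto.strip()
-- ===== Notes on version B (the rewrite author's own statement) =====
-- stated objective: alternative
-- what changed: B replaces A's single stateful scan (nova_frase flag, per-token rstrip on one growing string) by staged passes: truncation via reverse-index, a stateless zip-with-previous-token capitalization rule ('.' sentinel), and a run-grouping renderer that joins whole word runs with spaces and attaches each punctuation run after one rstrip.
import Mathlib
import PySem

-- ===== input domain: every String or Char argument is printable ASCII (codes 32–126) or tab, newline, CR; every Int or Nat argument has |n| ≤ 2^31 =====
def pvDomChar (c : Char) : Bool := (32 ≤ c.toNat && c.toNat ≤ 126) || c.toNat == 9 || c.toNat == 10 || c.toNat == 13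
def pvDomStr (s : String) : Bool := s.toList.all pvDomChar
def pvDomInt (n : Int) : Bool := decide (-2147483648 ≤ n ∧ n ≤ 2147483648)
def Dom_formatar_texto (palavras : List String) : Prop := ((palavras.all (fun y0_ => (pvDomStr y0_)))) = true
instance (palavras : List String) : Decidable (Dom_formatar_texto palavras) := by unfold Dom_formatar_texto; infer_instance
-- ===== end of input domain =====

-- B is staged: truncate at the last '.' via reverse-index, capitalize by a stateless
-- previous-token rule (zip), then render by grouping tokens into word/punctuation runs
-- joined at once — instead of A's single stateful flag-and-growing-string loop; equal returns.

-- Python str.capitalize() for ASCII strings (exact on Dom: printable ASCII + tab/newline/CR):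
-- first character uppercased, the rest lowercased.  Used by both Pythons (both call .capitalize()).
def pyCapitalize (cs : List Char) : List Char :=
  match cs with
  | [] => []
  | c :: t => PySem.Chars.upperChar c :: PySem.Chars.lower t

-- ===== PORT A =====
-- 'for i in reversed(range(len(palavras))): if palavras[i] == '.': ultimo_ponto = i; break'
-- (the index i is always in range, so palavras[i] is (pyGet? …).getD "")
def aUltimoPonto (palavras : List String) : List Int → Option Int
  | [] => none
  | i :: rest =>
      if (PySem.List.pyGet? palavras i).getD "" == "." then some i
      else aUltimoPonto palavras rest

-- one iteration of A's main loop; state = (texto, nova_frase)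
def stepA (st : List Char × Bool) (palavra : String) : List Char × Bool :=
  if palavra == "." then
    (PySem.Chars.rstrip st.1 ++ palavra.toList, true)
  else if PySem.Str.isIn palavra ",!?;:" then
    (PySem.Chars.rstrip st.1 ++ palavra.toList, false)
  else if st.2 then
    (st.1 ++ ' ' :: pyCapitalize palavra.toList, false)
  else
    (st.1 ++ ' ' :: palavra.toList, false)

def formatar_texto (palavras : List String) : String :=
  let palavras' :=
    match aUltimoPonto palavras (PySem.List.pyRange 0 (palavras.length : Int)).reverse with
    | some i => PySem.List.slice palavras none (some (i + 1))
    | none => palavras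
  let st := palavras'.foldl stepA ([], true)
  String.ofList (PySem.Chars.strip st.1)

-- ===== PORT B =====
-- '_eh_pontuacao(t)'
def ehPont (t : String) : Bool := t == "." || PySem.Str.isIn t ",!?;:"

-- "if '.' in palavras: palavras = palavras[:len(palavras) - palavras[::-1].index('.')]"
def bTrunc (palavras : List String) : List String :=
  if palavras.contains "." then
    match PySem.List.index? palavras.reverse "." with
    | some k => PySem.List.slice palavras none (some ((palavras.length : Int) - (k : Int)))
    | none => palavras        -- unreachable: '.' ∈ palavras
  else palavras

-- the zip comprehension: capitalize a word whose previous token (sentinel '.') is '.'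
def bCaps (palavras : List String) : List String :=
  (List.zip ("." :: palavras) palavras).map (fun pw =>
    if pw.1 == "." && !ehPont pw.2 then String.ofList (pyCapitalize pw.2.toList) else pw.2)

-- the while loop over runs: tokens[i:j] is a maximal run of punctuation (attached after one
-- rstrip, joined by '') or of words (joined by ' ' after a leading space)
def bRender (texto : List Char) : List String → List Char
  | [] => texto
  | t :: rest =>
    if ehPont t then
      bRender (PySem.Chars.rstrip texto ++
          PySem.Chars.join [] (((t :: rest).takeWhile ehPont).map String.toList))
        ((t :: rest).dropWhile ehPont)
    else
      bRender (texto ++ ' ' ::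
          PySem.Chars.join [' '] (((t :: rest).takeWhile (fun s => !ehPont s)).map String.toList))
        ((t :: rest).dropWhile (fun s => !ehPont s))
  termination_by ts => ts.length
  decreasing_by
  · simp only [List.dropWhile_cons, *]
    calc (rest.dropWhile ehPont).length ≤ rest.length := List.length_dropWhile_le ..
      _ < (t :: rest).length := by simp
  · simp only [List.dropWhile_cons, *]
    calc (rest.dropWhile (fun s => !ehPont s)).length ≤ rest.length := List.length_dropWhile_le ..
      _ < (t :: rest).length := by simp [*]

def formatar_texto_alt (palavras : List String) : String :=
  String.ofList (PySem.Chars.strip (bRender [] (bCaps (bTrunc palavras))))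

-- ===== PRECONDITION & SPEC =====
def Spec_formatar_texto (palavras : List String) (out : String) : Prop := out = formatar_texto_alt palavras
instance (palavras : List String) (out : String) : Decidable (Spec_formatar_texto palavras out) := by unfold Spec_formatar_texto; infer_instance

-- ===== CLAIM (what is proved, stated in full; the proofs are below) =====
def Claim_equal_formatar_texto : Prop := ∀ (palavras : List String), Dom_formatar_texto palavras → Spec_formatar_texto palavras (formatar_texto palavras)

-- ===== LEMMAS AND PROOFS =====

-- ---- characters: Python case mapping fixes the punctuation characters ----

theorem toNat_ofNat_small (n : Nat) (h : n < 55000) : (Char.ofNat n).toNat = n := by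
  unfold Char.ofNat
  rw [dif_pos (by unfold Nat.isValidChar; omega)]
  simp [Char.toNat, Char.ofNatAux]

theorem islower_toNat (c : Char) (h : PySem.Chars.islower c = true) :
    97 ≤ c.toNat ∧ c.toNat ≤ 122 := by
  simp only [PySem.Chars.islower, Bool.and_eq_true, decide_eq_true_eq, Char.le_def,
    UInt32.le_iff_toNat_le] at h
  exact ⟨h.1, h.2⟩

theorem isupper_toNat (c : Char) (h : PySem.Chars.isupper c = true) :
    65 ≤ c.toNat ∧ c.toNat ≤ 90 := by
  simp only [PySem.Chars.isupper, Bool.and_eq_true, decide_eq_true_eq, Char.le_def,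
    UInt32.le_iff_toNat_le] at h
  exact ⟨h.1, h.2⟩

theorem upperChar_toNat (c : Char) (h : PySem.Chars.islower c = true) :
    65 ≤ (PySem.Chars.upperChar c).toNat ∧ (PySem.Chars.upperChar c).toNat ≤ 90 := by
  obtain ⟨h1, h2⟩ := islower_toNat c h
  rw [PySem.Chars.upperChar, if_pos h, toNat_ofNat_small _ (by omega)]
  omega

theorem lowerChar_toNat (c : Char) (h : PySem.Chars.isupper c = true) :
    97 ≤ (PySem.Chars.lowerChar c).toNat ∧ (PySem.Chars.lowerChar c).toNat ≤ 122 := by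
  obtain ⟨h1, h2⟩ := isupper_toNat c h
  rw [PySem.Chars.lowerChar, if_pos h, toNat_ofNat_small _ (by omega)]
  omega

def punctChars : List Char := [',', '!', '?', ';', ':']

theorem toNat_of_mem_punct (c : Char) (h : c ∈ punctChars) : c.toNat ≤ 63 := by
  simp only [punctChars, List.mem_cons, List.not_mem_nil, or_false] at h
  rcases h with h | h | h | h | h <;> subst h <;> decide

theorem upperChar_fix_of_mem (c : Char) (h : PySem.Chars.upperChar c ∈ punctChars) :
    PySem.Chars.upperChar c = c := by
  by_cases hl : PySem.Chars.islower c = true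
  · exact absurd (toNat_of_mem_punct _ h) (by have := (upperChar_toNat c hl).1; omega)
  · rw [PySem.Chars.upperChar, if_neg hl]

theorem lowerChar_fix_of_mem (c : Char) (h : PySem.Chars.lowerChar c ∈ punctChars) :
    PySem.Chars.lowerChar c = c := by
  by_cases hu : PySem.Chars.isupper c = true
  · exact absurd (toNat_of_mem_punct _ h) (by have := (lowerChar_toNat c hu).1; omega)
  · rw [PySem.Chars.lowerChar, if_neg hu]

theorem upperChar_eq_dot (c : Char) (h : PySem.Chars.upperChar c = '.') : c = '.' := by
  by_cases hl : PySem.Chars.islower c = true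
  · have := (upperChar_toNat c hl).1
    rw [h] at this; exact absurd this (by decide)
  · rwa [PySem.Chars.upperChar, if_neg hl] at h

-- capitalize of a non-punctuation token is not punctuation
theorem capitalize_fix (cs : List Char) (h : ∀ c ∈ pyCapitalize cs, c ∈ punctChars) :
    pyCapitalize cs = cs := by
  cases cs with
  | nil => rfl
  | cons c t =>
    simp only [pyCapitalize, PySem.Chars.lower] at h ⊢
    refine congrArg₂ (· :: ·) (upperChar_fix_of_mem c (h _ (by simp))) ?_
    have : ∀ y ∈ t, PySem.Chars.lowerChar y = y := fun y hy =>
      lowerChar_fix_of_mem y (h _ (by simp; exact Or.inr ⟨y, hy, rfl⟩))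
    simpa using List.map_congr_left this ▸ (List.map_id t)

-- capitalize of a non-punctuation token is not punctuation
theorem ehPont_capitalize (w : String) (h : ehPont w = false) :
    ehPont (String.ofList (pyCapitalize w.toList)) = false := by
  simp only [ehPont, Bool.or_eq_false_iff, beq_eq_false_iff_ne, ne_eq] at h ⊢
  obtain ⟨h1, h2⟩ := h
  constructor
  · intro hc
    have hl : pyCapitalize w.toList = ['.'] := by
      have := congrArg String.toList hc
      simpa [show ".".toList = ['.'] from rfl] using this
    cases hw : w.toList with
    | nil => rw [hw] at hl; simp [pyCapitalize] at hl
    | cons c t =>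
      rw [hw] at hl
      simp only [pyCapitalize, List.cons.injEq] at hl
      have ht : t = [] := by simpa [PySem.Chars.lower] using hl.2
      have hcd := upperChar_eq_dot c hl.1
      apply h1
      have hdot : w.toList = ['.'] := by rw [hw, ht, hcd]
      calc w = String.ofList w.toList := by simp
        _ = "." := by rw [hdot]
  · rw [Bool.eq_false_iff]
    intro hc
    rw [PySem.Str.isIn_iff_infix] at hc
    rw [String.toList_ofList] at hc
    have hpc : (",!?;:".toList) = punctChars := by decide
    rw [hpc] at hc
    have hfix := capitalize_fix w.toList (fun c hcm => hc.subset hcm)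
    rw [hfix] at hc
    rw [Bool.eq_false_iff] at h2
    exact h2 (by rw [PySem.Str.isIn_iff_infix, hpc]; exact hc)

-- ---- whitespace facts ----

theorem punct_no_space (t : String) (h : ehPont t = true) :
    ∀ c ∈ t.toList, PySem.Chars.isspace c = false := by
  intro c hc
  simp only [ehPont, Bool.or_eq_true, beq_iff_eq] at h
  rcases h with h | h
  · subst h
    simp only [show ".".toList = ['.'] from rfl, List.mem_singleton] at hc
    subst hc; decide
  · rw [PySem.Str.isIn_iff_infix] at h
    have hsub := h.subset hc
    have hpc : (",!?;:".toList) = punctChars := by decide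
    rw [hpc] at hsub
    simp only [punctChars, List.mem_cons, List.not_mem_nil, or_false] at hsub
    rcases hsub with h | h | h | h | h <;> subst h <;> decide

theorem rstrip_eq_self_of_nonspace (b : List Char) (h : ∀ c ∈ b, PySem.Chars.isspace c = false) :
    PySem.Chars.rstrip b = b := by
  rw [PySem.Chars.rstrip, List.dropWhile_eq_self_iff.mpr ?_, List.reverse_reverse]
  intro hb
  simp only [Bool.not_eq_true]
  exact h _ (List.mem_reverse.mp (List.getElem_mem hb))

theorem rstrip_append (a b : List Char) :
    PySem.Chars.rstrip (a ++ b) =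
      if PySem.Chars.rstrip b = [] then PySem.Chars.rstrip a else a ++ PySem.Chars.rstrip b := by
  simp [PySem.Chars.rstrip, List.dropWhile_append]
  split
  · next h => simp_all
  · next h => simp

theorem rstrip_idem (a : List Char) : PySem.Chars.rstrip (PySem.Chars.rstrip a) = PySem.Chars.rstrip a := by
  simp [PySem.Chars.rstrip, List.dropWhile_idempotent]

theorem rstrip_rstrip_append (a b : List Char) (h : ∀ c ∈ b, PySem.Chars.isspace c = false) :
    PySem.Chars.rstrip (PySem.Chars.rstrip a ++ b) = PySem.Chars.rstrip a ++ b := by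
  rw [rstrip_append, rstrip_eq_self_of_nonspace b h]
  cases hb : b with
  | nil => simp [rstrip_idem]
  | cons x t => rw [if_neg (by simp)]

-- ---- the truncation: A's reversed-range scan = B's reverse-index ----

theorem aUltimo_congr (xs ys : List String) (idxs : List Int)
    (h : ∀ i ∈ idxs, PySem.List.pyGet? xs i = PySem.List.pyGet? ys i) :
    aUltimoPonto xs idxs = aUltimoPonto ys idxs := by
  induction idxs with
  | nil => rfl
  | cons i rest ih =>
    simp only [aUltimoPonto, h i (by simp)]
    split
    · rfl
    · exact ih (fun j hj => h j (by simp [hj]))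

theorem ultimo_eq_index (xs : List String) :
    aUltimoPonto xs (PySem.List.pyRange 0 (xs.length : Int) 1).reverse =
      (PySem.List.index? xs.reverse ".").map (fun (k : Nat) => (xs.length : Int) - 1 - (k : Int)) := by
  induction xs using List.reverseRecOn with
  | nil =>
      simp [aUltimoPonto, show PySem.List.pyRange 0 (0 : Int) 1 = [] from by decide]
  | append_singleton ys x ih =>
    have hn : (((ys ++ [x]).length : Nat) : Int) = (ys.length : Int) + 1 := by simp
    rw [hn, PySem.List.pyRange_one_succ_right (by positivity), List.reverse_append]
    simp only [List.reverse_singleton, List.singleton_append, aUltimoPonto]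
    have hget : PySem.List.pyGet? (ys ++ [x]) ((ys.length : Nat) : Int) = some x := by
      rw [PySem.List.pyGet?_natCast]
      simp
    rw [hget]
    by_cases hx : x = "."
    · subst hx
      rw [if_pos (by simp)]
      rw [List.reverse_append, List.reverse_singleton, List.singleton_append,
        PySem.List.index?_cons_self]
      simp
    · rw [if_neg (by simpa using hx)]
      have hcong : aUltimoPonto (ys ++ [x]) (PySem.List.pyRange 0 ((ys.length : Nat) : Int) 1).reverse
          = aUltimoPonto ys (PySem.List.pyRange 0 ((ys.length : Nat) : Int) 1).reverse := by
        apply aUltimo_congr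
        intro i hi
        rw [List.mem_reverse, PySem.List.mem_pyRange_one] at hi
        obtain ⟨h0, hlt⟩ := hi
        lift i to Nat using h0 with k
        rw [PySem.List.pyGet?_natCast, PySem.List.pyGet?_natCast,
          List.getElem?_append_left (by exact_mod_cast hlt)]
      rw [hcong, ih, List.reverse_append, List.reverse_singleton, List.singleton_append,
        PySem.List.index?_cons_of_ne _ hx]
      cases PySem.List.index? ys.reverse "." with
      | none => rfl
      | some k =>
        simp only [Option.map_some]
        congr 1
        push_cast [List.length_append]
        ring

theorem trunc_eq (palavras : List String) :
    (match aUltimoPonto palavras (PySem.List.pyRange 0 (palavras.length : Int) 1).reverse with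
      | some i => PySem.List.slice palavras none (some (i + 1))
      | none => palavras) = bTrunc palavras := by
  rw [ultimo_eq_index]
  unfold bTrunc
  cases hidx : PySem.List.index? palavras.reverse "." with
  | none =>
    have hmem : "." ∉ palavras := by
      have := (PySem.List.index?_eq_none_iff palavras.reverse ".").mp hidx
      simpa using this
    rw [if_neg (by simpa using hmem)]
    rfl
  | some k =>
    have hmem : "." ∈ palavras := by
      have := (PySem.List.index?_isSome_iff palavras.reverse ".").mp (by rw [hidx]; rfl)
      simpa using this
    rw [if_pos (by simpa using hmem)]
    rw [Option.map_some]
    show PySem.List.slice palavras none (some (((palavras.length : Int) - 1 - (k : Int)) + 1)) = _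
    rw [show ((palavras.length : Int) - 1 - (k : Int)) + 1
        = (palavras.length : Int) - (k : Int) from by ring]

-- ---- capitalization: the stateful flag = the previous-token rule ----

def capsS (nova : Bool) : List String → List String
  | [] => []
  | p :: rest =>
      (if ehPont p then p
       else if nova then String.ofList (pyCapitalize p.toList) else p) :: capsS (p == ".") rest

theorem caps_zip (xs : List String) : ∀ prev : String,
    (List.zip (prev :: xs) xs).map (fun pw =>
        if pw.1 == "." && !ehPont pw.2 then String.ofList (pyCapitalize pw.2.toList) else pw.2) =
      capsS (prev == ".") xs := by
  induction xs with
  | nil => intro prev; rfl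
  | cons x rest ih =>
    intro prev
    simp only [List.zip_cons_cons, List.map_cons, capsS, ih x]
    by_cases hp : ehPont x = true
    · simp [hp]
    · rw [Bool.not_eq_true] at hp
      by_cases hq : prev = "." <;> simp [hp, hq]

theorem bCaps_eq_capsS (xs : List String) : bCaps xs = capsS true xs := by
  have := caps_zip xs "."
  simpa [bCaps] using this

-- ---- rendering: the flag loop = stepR over the capitalized tokens = the run grouping ----

def stepR (texto : List Char) (t : String) : List Char :=
  if ehPont t then PySem.Chars.rstrip texto ++ t.toList else texto ++ ' ' :: t.toList

theorem foldA_eq_stepR (ps : List String) : ∀ (texto : List Char) (nova : Bool),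
    (ps.foldl stepA (texto, nova)).1 = (capsS nova ps).foldl stepR texto := by
  induction ps with
  | nil => intro texto nova; rfl
  | cons p rest ih =>
    intro texto nova
    simp only [List.foldl_cons]
    by_cases hd : p = "."
    · subst hd
      have hA : stepA (texto, nova) "." = (PySem.Chars.rstrip texto ++ ".".toList, true) := by
        simp [stepA]
      have hC : capsS nova ("." :: rest) = "." :: capsS true rest := by
        simp [capsS, show ehPont "." = true from by decide]
      rw [hA, hC, List.foldl_cons,
        show stepR texto "." = PySem.Chars.rstrip texto ++ ".".toList from by
          simp [stepR, show ehPont "." = true from by decide]]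
      exact ih _ true
    · have hb : (p == ".") = false := by simp [hd]
      by_cases hin : PySem.Str.isIn p ",!?;:" = true
      · have he : ehPont p = true := by simp only [ehPont, hin, Bool.or_true]
        have hA : stepA (texto, nova) p = (PySem.Chars.rstrip texto ++ p.toList, false) := by
          simp only [stepA, hb, Bool.false_eq_true, if_false, hin, if_true]
        have hC : capsS nova (p :: rest) = p :: capsS false rest := by
          simp only [capsS, he, if_true, hb]
        rw [hA, hC, List.foldl_cons,
          show stepR texto p = PySem.Chars.rstrip texto ++ p.toList from by
            simp only [stepR, he, if_true]]
        exact ih _ false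
      · have hin' : PySem.Str.isIn p ",!?;:" = false := by
          cases hx : PySem.Str.isIn p ",!?;:" <;> simp_all
        have he : ehPont p = false := by
          simp only [ehPont, hb, hin', Bool.or_false]
        have hC : capsS nova (p :: rest) =
            (if nova then String.ofList (pyCapitalize p.toList) else p) :: capsS false rest := by
          simp only [capsS, he, Bool.false_eq_true, if_false, hb]
        rw [hC, List.foldl_cons]
        cases nova with
        | true =>
          have hA : stepA (texto, true) p = (texto ++ ' ' :: pyCapitalize p.toList, false) := by
            simp only [stepA, hb, Bool.false_eq_true, if_false, hin', if_true]
          rw [hA, if_pos rfl,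
            show stepR texto (String.ofList (pyCapitalize p.toList)) =
                texto ++ ' ' :: pyCapitalize p.toList from by
              simp [stepR, ehPont_capitalize p he]]
          exact ih _ false
        | false =>
          have hA : stepA (texto, false) p = (texto ++ ' ' :: p.toList, false) := by
            simp only [stepA, hb, Bool.false_eq_true, if_false, hin']
          rw [hA, if_neg (by simp),
            show stepR texto p = texto ++ ' ' :: p.toList from by
              simp only [stepR, he, Bool.false_eq_true, if_false]]
          exact ih _ false

theorem punct_run_foldl (run : List String) (texto : List Char)
    (h : ∀ t ∈ run, ehPont t = true) (hne : run ≠ []) :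
    run.foldl stepR texto =
      PySem.Chars.rstrip texto ++ PySem.Chars.join [] (run.map String.toList) := by
  induction run generalizing texto with
  | nil => exact absurd rfl hne
  | cons p ps ih =>
    have hp := h p (by simp)
    simp only [List.foldl_cons, List.map_cons]
    have hstep : stepR texto p = PySem.Chars.rstrip texto ++ p.toList := by
      simp [stepR, hp]
    rw [hstep]
    cases ps with
    | nil => simp [PySem.Chars.join_singleton]
    | cons q qs =>
      rw [ih _ (fun t ht => h t (List.mem_cons_of_mem _ ht)) (by simp),
        rstrip_rstrip_append _ _ (punct_no_space p hp), List.map_cons,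
        PySem.Chars.join_cons_cons]
      simp

theorem word_run_foldl (run : List String) (texto : List Char)
    (h : ∀ t ∈ run, ehPont t = false) (hne : run ≠ []) :
    run.foldl stepR texto =
      texto ++ ' ' :: PySem.Chars.join [' '] (run.map String.toList) := by
  induction run generalizing texto with
  | nil => exact absurd rfl hne
  | cons w ws ih =>
    have hw := h w (by simp)
    simp only [List.foldl_cons, List.map_cons]
    have hstep : stepR texto w = texto ++ ' ' :: w.toList := by
      simp [stepR, hw]
    rw [hstep]
    cases ws with
    | nil => simp [PySem.Chars.join_singleton]
    | cons q qs =>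
      rw [ih _ (fun t ht => h t (List.mem_cons_of_mem _ ht)) (by simp), List.map_cons, PySem.Chars.join_cons_cons]
      simp

theorem bRender_eq_foldl (ts : List String) (texto : List Char) :
    bRender texto ts = ts.foldl stepR texto := by
  fun_induction bRender texto ts with
  | case1 texto => rfl
  | case2 texto t rest hpt ih =>
    rw [ih]
    conv_rhs => rw [← List.takeWhile_append_dropWhile (p := ehPont) (l := t :: rest)]
    rw [List.foldl_append]
    congr 1
    rw [punct_run_foldl _ _ (fun x hx => List.mem_takeWhile_imp hx)
      (by rw [List.takeWhile_cons_of_pos hpt]; simp)]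
  | case3 texto t rest hpt ih =>
    rw [ih]
    conv_rhs => rw [← List.takeWhile_append_dropWhile (p := fun s => !ehPont s) (l := t :: rest)]
    rw [List.foldl_append]
    congr 1
    rw [word_run_foldl _ _ (fun x hx => by simpa using List.mem_takeWhile_imp hx)
      (by rw [List.takeWhile_cons_of_pos (by simpa using hpt)]; simp)]

-- ===== VERDICT (by name: the statement is the Claim_ definition above) =====
theorem formatar_texto_spec : Claim_equal_formatar_texto := by
  intro palavras _
  show _ = _
  unfold formatar_texto formatar_texto_alt
  rw [trunc_eq, bCaps_eq_capsS, bRender_eq_foldl, ← foldA_eq_stepR]
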